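-- pv_equiv track=rewrite | github.com/rupesh-dharme/Computer-Networks-Lab | Assignment 03/Trial codes/humming.py | calculate_r
-- ===== SOURCE A (Python) =====
-- def calculate_r(arr, n):
--     parity = True
--     flag = True
--     c = 0
--     for i in range(n, len(arr)):
--         if flag == True:
--             c+=1
--             if arr[i] == '1':
--                 parity = not parity
--             if c>n:
--                 flag = not flag
--                 c = 0
--         else:
--             c+=1
--             if c>n:
--                 flag = not flag
--                 c = 0
--     return 0 if parity else 1
-- ===== SOURCE B (Python) =====
-- def calculate_r(arr, n):
--     ones = sum(1 for i in range(n, len(arr))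
--                if ((i - n) // (n + 1)) % 2 == 0 and arr[i] == '1')
--     return ones % 2
-- ===== Notes on version B (the rewrite author's own statement) =====
-- stated objective: simpler
-- what changed: Replaced A's toggling flag/counter state machine and running boolean parity with a closed-form block test ((i-n)//(n+1)) % 2 == 0 selecting the 'on' positions directly, counting the '1's there and returning count % 2.
-- outside the precondition, e.g. on calculate_r(['1', '0'], -1): A returns 0, B raises ZeroDivisionError; on calculate_r(['1', '1', '0'], -2): A returns 0, B returns 0
import Mathlib
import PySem

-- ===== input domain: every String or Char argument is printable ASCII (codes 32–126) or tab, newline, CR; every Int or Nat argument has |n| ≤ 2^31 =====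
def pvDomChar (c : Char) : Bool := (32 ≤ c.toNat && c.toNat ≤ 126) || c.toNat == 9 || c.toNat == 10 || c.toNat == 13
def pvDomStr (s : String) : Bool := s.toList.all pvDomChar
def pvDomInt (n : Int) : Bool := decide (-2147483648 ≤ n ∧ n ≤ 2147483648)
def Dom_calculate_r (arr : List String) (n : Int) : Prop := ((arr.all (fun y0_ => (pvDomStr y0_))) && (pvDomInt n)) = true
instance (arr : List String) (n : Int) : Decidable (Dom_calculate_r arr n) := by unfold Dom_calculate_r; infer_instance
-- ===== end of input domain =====

-- B replaces A's toggling flag/counter state machine with a closed-form block test and a count-then-mod (objective: simpler).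

-- ===== PORT A =====
-- loop body of A; arr[i] is PySem.List.pyGet? (inside Pre_ every i ∈ [n, len arr) is in range, so it never raises)
def pvStepA (arr : List String) (n : Int) (st : Bool × Bool × Int) (i : Int) : Bool × Bool × Int :=
  let parity := st.1
  let flag := st.2.1
  let c := st.2.2
  if flag == true then
    let c := c + 1
    let parity := if PySem.List.pyGet? arr i == some "1" then !parity else parity
    if c > n then (parity, !flag, 0) else (parity, flag, c)
  else
    let c := c + 1
    if c > n then (parity, !flag, 0) else (parity, flag, c)

def calculate_r (arr : List String) (n : Int) : Int :=
  let s := (PySem.List.pyRange n (arr.length : Int) 1).foldl (pvStepA arr n) (true, true, 0)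
  if s.1 then 0 else 1

-- ===== PORT B =====
-- contribution of index i to B's generator sum
def pvOnBit (arr : List String) (n : Int) (i : Int) : Int :=
  if PySem.Int.mod (PySem.Int.floordiv (i - n) (n + 1)) 2 == 0 && PySem.List.pyGet? arr i == some "1" then 1 else 0

def calculate_r_alt (arr : List String) (n : Int) : Int :=
  let ones := (PySem.List.pyRange n (arr.length : Int) 1).foldl (fun acc i => acc + pvOnBit arr n i) 0
  PySem.Int.mod ones 2

-- ===== PRECONDITION & SPEC =====
-- Pre_ excludes negative n: a negative parity-bit count is outside this Hamming-code helper's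
-- natural domain — there A raises IndexError for n < -len(arr) and otherwise returns a value only
-- through negative-index wraparound, while B's block formula divides by n+1 (and raises at n = -1).
def Pre_calculate_r (arr : List String) (n : Int) : Prop := 0 ≤ n
instance (arr : List String) (n : Int) : Decidable (Pre_calculate_r arr n) := by unfold Pre_calculate_r; infer_instance
def pvWitness_calculate_r : List String × Int := (["1", "0", "1", "1"], 1)
def Spec_calculate_r (arr : List String) (n : Int) (out : Int) : Prop := out = calculate_r_alt arr n
instance (arr : List String) (n : Int) (out : Int) : Decidable (Spec_calculate_r arr n out) := by unfold Spec_calculate_r; infer_instance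

-- ===== CLAIM (what is proved, stated in full; the proofs are below) =====
def Claim_equal_calculate_r : Prop := ∀ (arr : List String) (n : Int), Dom_calculate_r arr n → Pre_calculate_r arr n → Spec_calculate_r arr n (calculate_r arr n)

-- ===== LEMMAS AND PROOFS =====

lemma foldl_add_sum (g : Int → Int) : ∀ (l : List Int) (x : Int),
    l.foldl (fun acc i => acc + g i) x = x + (l.map g).sum := by
  intro l
  induction l with
  | nil => intro x; simp
  | cons a t ih => intro x; simp [ih]; ring

-- counter/flag arithmetic: one step of the block clock
lemma clock_step (m d : Int) (hm : 0 < m) (_hd : 0 ≤ d) :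
    (PySem.Int.mod d m = m - 1 →
       PySem.Int.floordiv (d + 1) m = PySem.Int.floordiv d m + 1 ∧ PySem.Int.mod (d + 1) m = 0) ∧
    (PySem.Int.mod d m ≠ m - 1 →
       PySem.Int.floordiv (d + 1) m = PySem.Int.floordiv d m ∧ PySem.Int.mod (d + 1) m = PySem.Int.mod d m + 1) := by
  have hid := PySem.Int.floordiv_mul_add_mod d m
  have hid1 := PySem.Int.floordiv_mul_add_mod (d + 1) m
  have hnn := PySem.Int.mod_nonneg d hm
  have hlt := PySem.Int.mod_lt d hm
  constructor
  · intro he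
    have hq : PySem.Int.floordiv (d + 1) m = PySem.Int.floordiv d m + 1 := by
      rw [PySem.Int.floordiv_eq_iff_of_pos hm]
      constructor <;> nlinarith
    refine ⟨hq, ?_⟩
    have := PySem.Int.floordiv_mul_add_mod (d + 1) m
    rw [hq] at this
    nlinarith
  · intro he
    have hq : PySem.Int.floordiv (d + 1) m = PySem.Int.floordiv d m := by
      rw [PySem.Int.floordiv_eq_iff_of_pos hm]
      constructor
      · nlinarith
      · have : PySem.Int.mod d m < m - 1 := lt_of_le_of_ne (by omega) he
        nlinarith
    refine ⟨hq, ?_⟩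
    have := PySem.Int.floordiv_mul_add_mod (d + 1) m
    rw [hq] at this
    nlinarith

-- main invariant: from any index a with the clock state matching a, A's parity fold equals the
-- starting parity xor'ed with the parity of B's remaining on-block count
lemma loop_inv (arr : List String) (n : Int) (hn : 0 ≤ n) :
    ∀ (k : Nat) (a : Int), n ≤ a → ((arr.length : Int) - a).toNat = k → ∀ (p : Bool),
      ((PySem.List.pyRange a (arr.length : Int) 1).foldl (pvStepA arr n)
        (p, decide (PySem.Int.mod (PySem.Int.floordiv (a - n) (n + 1)) 2 = 0),
            PySem.Int.mod (a - n) (n + 1))).1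
      = xor p (decide (PySem.Int.mod
          (((PySem.List.pyRange a (arr.length : Int) 1).map (pvOnBit arr n)).sum) 2 = 1)) := by
  intro k
  induction k with
  | zero =>
    intro a _ hk p
    have hba : (arr.length : Int) ≤ a := by omega
    rw [PySem.List.pyRange_one_eq_nil hba]
    simp [PySem.Int.mod]
  | succ k ih =>
    intro a ha hk p
    have hab : a < (arr.length : Int) := by omega
    rw [PySem.List.pyRange_one_cons hab]
    have hm : (0 : Int) < n + 1 := by omega
    have hd : (0 : Int) ≤ a - n := by omega
    have hcl := clock_step (n + 1) (a - n) hm hd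
    have hnn := PySem.Int.mod_nonneg (a - n) hm
    have hlt := PySem.Int.mod_lt (a - n) hm
    set q := PySem.Int.floordiv (a - n) (n + 1) with hq
    set e := PySem.Int.mod (a - n) (n + 1) with he
    have hd1 : a + 1 - n = (a - n) + 1 := by ring
    -- the new state after pvStepA
    have hstep : pvStepA arr n (p, decide (PySem.Int.mod q 2 = 0), e) a
        = (xor p (decide (pvOnBit arr n a = 1)),
           decide (PySem.Int.mod (PySem.Int.floordiv (a + 1 - n) (n + 1)) 2 = 0),
           PySem.Int.mod (a + 1 - n) (n + 1)) := by
      by_cases hend : e = (n + 1) - 1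
      · -- end of a block: counter resets, flag toggles
        obtain ⟨hq1, he1⟩ := hcl.1 hend
        rw [hd1, hq1, he1]
        have hq2 : decide (PySem.Int.mod (q + 1) 2 = 0) = !decide (PySem.Int.mod q 2 = 0) := by
          have h2 : (0:Int) < 2 := by norm_num
          simp only [PySem.Int.mod_eq_emod_of_pos h2]
          rcases Int.emod_two_eq q with h | h <;> simp [h] <;> omega
        by_cases hf : PySem.Int.mod q 2 = 0
        · -- flag is on: this index is counted
          have hf' : (2:Int) ∣ q := (PySem.Int.mod_eq_zero_iff_dvd q 2).mp hf
          simp only [pvStepA, pvOnBit, hf, hq2]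
          by_cases h1 : PySem.List.pyGet? arr a == some "1" <;>
            simp [← hq, h1, hf', show e + 1 > n from by omega]
        · have hf' : ¬ (2:Int) ∣ q := fun h => hf ((PySem.Int.mod_eq_zero_iff_dvd q 2).mpr h)
          simp only [pvStepA, pvOnBit, hf, hq2]
          simp [← hq, hf', show e + 1 > n from by omega]
      · -- middle of a block: counter advances, flag unchanged
        obtain ⟨hq1, he1⟩ := hcl.2 hend
        rw [hd1, hq1, he1]
        by_cases hf : PySem.Int.mod q 2 = 0
        · have hf' : (2:Int) ∣ q := (PySem.Int.mod_eq_zero_iff_dvd q 2).mp hf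
          simp only [pvStepA, pvOnBit, hf]
          by_cases h1 : PySem.List.pyGet? arr a == some "1" <;>
            simp [← hq, h1, hf', show ¬ (e + 1 > n) from by omega]
        · have hf' : ¬ (2:Int) ∣ q := fun h => hf ((PySem.Int.mod_eq_zero_iff_dvd q 2).mpr h)
          simp only [pvStepA, pvOnBit, hf]
          simp [← hq, hf', show ¬ (e + 1 > n) from by omega]
    simp only [List.foldl_cons, hstep]
    rw [ih (a + 1) (by omega) (by omega) (xor p (decide (pvOnBit arr n a = 1)))]
    -- combine the head bit with the tail sum's parity
    have hbit : pvOnBit arr n a = 0 ∨ pvOnBit arr n a = 1 := by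
      unfold pvOnBit; split <;> simp
    have htail : (0:Int) ≤ ((PySem.List.pyRange (a+1) (arr.length : Int) 1).map (pvOnBit arr n)).sum := by
      apply List.sum_nonneg
      intro x hx
      simp only [List.mem_map] at hx
      obtain ⟨i, _, rfl⟩ := hx
      unfold pvOnBit; split <;> simp
    set S := ((PySem.List.pyRange (a+1) (arr.length : Int) 1).map (pvOnBit arr n)).sum with hS
    have h2 : (0:Int) < 2 := by norm_num
    simp only [List.map_cons, List.sum_cons]
    simp only [PySem.Int.mod_eq_emod_of_pos h2]
    rcases hbit with hb | hb <;> rcases Int.emod_two_eq S with hs | hs <;>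
      rw [hb] <;> rw [Int.add_emod] <;> rw [← hS] <;> simp [hs]

-- ===== VERDICT (by name: the statement is the Claim_ definition above) =====
theorem calculate_r_spec : Claim_equal_calculate_r := by
  intro arr n _ hpre
  unfold Spec_calculate_r calculate_r calculate_r_alt
  have hn : (0 : Int) ≤ n := hpre
  have hstart := loop_inv arr n hn ((arr.length : Int) - n).toNat n le_rfl rfl true
  have hz : n - n = 0 := by ring
  rw [hz] at hstart
  have hfd0 : PySem.Int.floordiv 0 (n + 1) = 0 := by
    rw [PySem.Int.floordiv_eq_iff_of_pos (by omega : (0:Int) < n + 1)]; omega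
  have hmod0 : PySem.Int.mod 0 (n + 1) = 0 := by
    have := PySem.Int.floordiv_mul_add_mod 0 (n + 1)
    rw [hfd0] at this; omega
  rw [hfd0, hmod0] at hstart
  have hm02 : PySem.Int.mod (0:Int) 2 = 0 := by
    rw [PySem.Int.mod_eq_emod_of_pos (by norm_num : (0:Int) < 2)]; simp
  simp only [hm02, decide_true] at hstart
  -- rewrite B's foldl-with-accumulator as 0 + sum of the mapped list
  have hsum : ((PySem.List.pyRange n (arr.length : Int) 1).foldl (fun acc i => acc + pvOnBit arr n i) 0)
      = ((PySem.List.pyRange n (arr.length : Int) 1).map (pvOnBit arr n)).sum := by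
    rw [foldl_add_sum (pvOnBit arr n)]; simp
  set S := ((PySem.List.pyRange n (arr.length : Int) 1).map (pvOnBit arr n)).sum with hS
  have hSnn : (0:Int) ≤ S := by
    apply List.sum_nonneg
    intro x hx
    simp only [List.mem_map] at hx
    obtain ⟨i, _, rfl⟩ := hx
    unfold pvOnBit; split <;> simp
  simp only [hsum]
  simp only [PySem.Int.mod_eq_emod_of_pos (by norm_num : (0:Int) < 2)] at hstart ⊢
  rcases Int.emod_two_eq S with hs | hs <;> simp [hs] at hstart ⊢ <;> simp [hstart]
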